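-- pv_equiv track=rewrite | github.com/egondo/1tdsr_listas | projeto_logistica.py | consulta_veiculo
-- ===== SOURCE A (Python) =====
-- def consulta_veiculo(placa, lista):
--     i = 1
--     while i < len(lista) and lista[i] != placa:
--         i = i + 7
--
--     if i >= len(lista):
--         return -1
--     else:
--         return i
-- ===== SOURCE B (Python) =====
-- def consulta_veiculo(placa, lista):
--     cand = [lista[i] for i in range(1, len(lista), 7)]
--     if placa in cand:
--         return 1 + 7 * cand.index(placa)
--     return -1
-- ===== Notes on version B (the rewrite author's own statement) =====
-- stated objective: simpler
-- what changed: Replaces the manual step-7 while loop over a running index with a two-phase build-then-search: materialise the stepped candidate list range(1, len, 7) once, then a single membership test plus .index, mapping the position back with 1 + 7*pos.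
import Mathlib
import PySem

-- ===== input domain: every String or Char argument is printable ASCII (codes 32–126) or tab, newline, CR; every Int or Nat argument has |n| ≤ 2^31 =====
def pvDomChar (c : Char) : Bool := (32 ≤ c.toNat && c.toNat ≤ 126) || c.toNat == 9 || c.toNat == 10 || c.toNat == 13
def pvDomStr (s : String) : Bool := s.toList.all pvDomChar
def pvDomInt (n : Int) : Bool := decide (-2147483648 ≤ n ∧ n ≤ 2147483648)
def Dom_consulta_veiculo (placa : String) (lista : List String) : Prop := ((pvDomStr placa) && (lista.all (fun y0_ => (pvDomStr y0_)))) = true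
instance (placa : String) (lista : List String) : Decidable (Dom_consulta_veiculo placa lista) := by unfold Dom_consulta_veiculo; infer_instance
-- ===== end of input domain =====

-- ===== PORT A =====
-- B changes the manual step-7 while loop into build-candidate-list-then-search; same return value, simpler structure.
-- A's loop: while i < len(lista) and lista[i] != placa: i = i + 7   (i starts at 1 and stays nonnegative, so Nat state is exact)
def consultaLoopA (placa : String) (lista : List String) (i : Nat) : Nat :=
  if i < lista.length ∧ lista[i]? ≠ some placa then
    consultaLoopA placa lista (i + 7)
  else i
termination_by lista.length - i

def consulta_veiculo (placa : String) (lista : List String) : Int :=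
  let i := consultaLoopA placa lista 1
  if i ≥ lista.length then -1 else (i : Int)

-- ===== PORT B =====
-- cand = [lista[i] for i in range(1, len(lista), 7)]  (every index produced by the range is in bounds, so the "" default of pyGetD is unreachable)
def consulta_veiculo_alt (placa : String) (lista : List String) : Int :=
  let cand := (PySem.List.pyRange 1 (lista.length : Int) 7).map
      (fun i => PySem.List.pyGetD lista i "")
  match PySem.List.index? cand placa with
  | some k => 1 + 7 * (k : Int)
  | none => -1

-- ===== PRECONDITION & SPEC =====
def Spec_consulta_veiculo (placa : String) (lista : List String) (out : Int) : Prop := out = consulta_veiculo_alt placa lista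
instance (placa : String) (lista : List String) (out : Int) : Decidable (Spec_consulta_veiculo placa lista out) := by unfold Spec_consulta_veiculo; infer_instance

-- ===== CLAIM (what is proved, stated in full; the proofs are below) =====
def Claim_equal_consulta_veiculo : Prop := ∀ (placa : String) (lista : List String), Dom_consulta_veiculo placa lista → Spec_consulta_veiculo placa lista (consulta_veiculo placa lista)

-- ===== LEMMAS AND PROOFS =====

theorem pyRange7_nil (a b : Int) (h : b ≤ a) : PySem.List.pyRange a b 7 = [] := by
  rw [PySem.List.pyRange_of_pos a b (by norm_num)]
  simp [show ¬ a < b by omega]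

theorem pyRange7_cons (a b : Int) (h : a < b) :
    PySem.List.pyRange a b 7 = a :: PySem.List.pyRange (a + 7) b 7 := by
  rw [PySem.List.pyRange_of_pos a b (by norm_num),
      PySem.List.pyRange_of_pos (a+7) b (by norm_num)]
  by_cases h7 : a + 7 < b
  · have e : ((b - a + 7 - 1) / 7).toNat = ((b - (a+7) + 7 - 1) / 7).toNat + 1 := by
      omega
    simp only [if_pos h, if_pos h7, e, List.range_succ_eq_map, List.map_cons, List.map_map]
    refine congrArg₂ List.cons (by simp) ?_
    apply List.map_congr_left
    intro k _
    simp [Function.comp, Nat.succ_eq_add_one]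
    ring
  · have e : ((b - a + 7 - 1) / 7).toNat = 1 := by omega
    simp [if_pos h, if_neg h7, e, List.range_succ]

theorem loop_eq_search (placa : String) (lista : List String) (j : Nat) :
    (if consultaLoopA placa lista j ≥ lista.length then (-1 : Int)
     else (consultaLoopA placa lista j : Int))
    = (match PySem.List.index?
          ((PySem.List.pyRange (j : Int) (lista.length : Int) 7).map
            (fun i => PySem.List.pyGetD lista i "")) placa with
       | some k => (j : Int) + 7 * (k : Int)
       | none => -1) := by
  by_cases hj : j < lista.length
  · rw [pyRange7_cons _ _ (by exact_mod_cast hj)]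
    have hget : PySem.List.pyGetD lista (j : Int) "" = lista[j] := by
      simp [PySem.List.pyGetD_natCast, List.getD_eq_getElem?_getD, hj]
    by_cases heq : lista[j] = placa
    · have hstop : consultaLoopA placa lista j = j := by
        rw [consultaLoopA, if_neg]
        simp [List.getElem?_eq_getElem hj, heq]
      rw [hstop, if_neg (by omega), List.map_cons, hget, heq,
          PySem.List.index?_cons_self]
      simp
    · have hstep : consultaLoopA placa lista j = consultaLoopA placa lista (j + 7) := by
        rw [consultaLoopA, if_pos ⟨hj, by simp [List.getElem?_eq_getElem hj, heq]⟩]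
      have ih := loop_eq_search placa lista (j + 7)
      rw [hstep, List.map_cons, hget,
          PySem.List.index?_cons_of_ne _ heq]
      have hcast : ((j : Int) + 7) = ((j + 7 : Nat) : Int) := by push_cast; ring
      rw [hcast, ih]
      cases PySem.List.index?
          ((PySem.List.pyRange ((j+7 : Nat) : Int) (lista.length : Int) 7).map
            (fun i => PySem.List.pyGetD lista i "")) placa with
      | none => simp
      | some k => simp only [Option.map_some]; push_cast; ring
  · have hstop : consultaLoopA placa lista j = j := by
      rw [consultaLoopA, if_neg (by simp [hj])]
    rw [hstop, if_pos (by omega),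
        pyRange7_nil _ _ (by exact_mod_cast Nat.le_of_not_lt hj)]
    simp [PySem.List.index?]
termination_by lista.length - j

-- ===== VERDICT (by name: the statement is the Claim_ definition above) =====
theorem consulta_veiculo_spec : Claim_equal_consulta_veiculo := by
  intro placa lista _
  unfold Spec_consulta_veiculo consulta_veiculo consulta_veiculo_alt
  have h := loop_eq_search placa lista 1
  simpa using h
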